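-- pv_equiv track=rewrite | github.com/superspeeder/things | token_parser.py | search
-- ===== SOURCE A (Python) =====
-- def search(data,tokens):
--   def innersearch(data,token):
--     data_l = list(data)
--     for loc, item in enumerate(data_l):
--       if item == token:
--         yield loc
--   dd = {}
--   for i in tokens:
--     dd[i] = list(innersearch(data,i))
--   return(dd)
-- ===== SOURCE B (Python) =====
-- def search(data, tokens):
--     pos = {}
--     for loc, item in enumerate(data):
--         pos.setdefault(item, []).append(loc)
--     return {t: pos.get(t, []) for t in tokens}
-- ===== Notes on version B (the rewrite author's own statement) =====
-- stated objective: faster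
-- what changed: B replaces A's per-token rescan of data (a generator scanning all of data for each token) with a single grouping pass that builds an item->indices dict, then answers each token by one dict lookup.
import Mathlib
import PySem

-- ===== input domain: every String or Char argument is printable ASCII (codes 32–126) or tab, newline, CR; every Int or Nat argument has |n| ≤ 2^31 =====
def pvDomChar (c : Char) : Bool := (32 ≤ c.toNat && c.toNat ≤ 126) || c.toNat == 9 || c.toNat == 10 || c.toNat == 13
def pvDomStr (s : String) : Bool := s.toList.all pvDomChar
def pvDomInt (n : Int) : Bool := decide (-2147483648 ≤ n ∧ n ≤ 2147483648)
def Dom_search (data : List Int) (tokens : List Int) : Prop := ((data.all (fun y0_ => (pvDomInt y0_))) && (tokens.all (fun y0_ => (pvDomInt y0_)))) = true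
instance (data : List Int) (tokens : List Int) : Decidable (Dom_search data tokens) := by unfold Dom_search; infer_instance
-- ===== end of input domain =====

-- B builds an item->indices dict in ONE pass over data and looks each token up, instead of rescanning data per token (alternative/faster algorithm).

-- Python's dict is ported as PySem.Dict; the returned dict is its items (insertion-order association list).

-- ===== PORT A =====
-- innersearch: the generator loop 'for loc, item in enumerate(data_l): if item == token: yield loc', collected by list(...)
def innersearch (data : List Int) (token : Int) : List Int :=
  (PySem.List.enumerate data).foldl (fun acc p => if p.2 = token then acc ++ [p.1] else acc) []

def search (data : List Int) (tokens : List Int) : List (Int × List Int) :=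
  (tokens.foldl (fun dd i => dd.insert i (innersearch data i)) PySem.Dict.empty).items

-- ===== PORT B =====
-- 'pos.setdefault(item, []).append(loc)' is exactly Dict.modify item [] (· ++ [loc])
def search_alt (data : List Int) (tokens : List Int) : List (Int × List Int) :=
  let pos : PySem.Dict Int (List Int) :=
    (PySem.List.enumerate data).foldl (fun d p => d.modify p.2 [] (· ++ [p.1])) PySem.Dict.empty
  (tokens.foldl (fun dd t => dd.insert t (pos.getD t [])) PySem.Dict.empty).items

-- ===== PRECONDITION & SPEC =====
def Spec_search (data : List Int) (tokens : List Int) (out : List (Int × List Int)) : Prop := out = search_alt data tokens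
instance (data : List Int) (tokens : List Int) (out : List (Int × List Int)) : Decidable (Spec_search data tokens out) := by unfold Spec_search; infer_instance

-- ===== CLAIM (what is proved, stated in full; the proofs are below) =====
def Claim_equal_search : Prop := ∀ (data : List Int) (tokens : List Int), Dom_search data tokens → Spec_search data tokens (search data tokens)

-- ===== LEMMAS AND PROOFS =====
-- the grouping dict's entry at t is exactly innersearch data t
theorem pos_getD_eq (data : List Int) (t : Int) :
    ((PySem.List.enumerate data).foldl (fun d p => d.modify p.2 [] (· ++ [p.1]))
      (PySem.Dict.empty : PySem.Dict Int (List Int))).getD t []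
    = innersearch data t := by
  have h : (PySem.List.enumerate data).foldl (fun d p => d.modify p.2 [] (· ++ [p.1]))
      (PySem.Dict.empty : PySem.Dict Int (List Int))
      = (((PySem.List.enumerate data).map (fun p => (p.2, p.1))).foldl
          (fun d q => d.modify q.1 [] (· ++ [q.2])) PySem.Dict.empty) := by
    rw [List.foldl_map]
  have hr : innersearch data t
      = ((PySem.List.enumerate data).filter (fun p => p.2 == t)).map (fun p => p.1) := by
    rw [innersearch]
    have := PySem.List.foldl_append_if (fun p : Int × Int => p.2 == t) (fun p => p.1)
      (PySem.List.enumerate data) []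
    simpa using this
  rw [h, PySem.Dict.getD_foldl_modify_append, hr]
  simp [List.filter_map, Function.comp_def]

theorem search_spec : Claim_equal_search := by
  intro data tokens _
  unfold Spec_search search search_alt
  congr 1
  exact PySem.List.foldl_congr_mem tokens _ _ _
    (fun dd i _ => by rw [pos_getD_eq])
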